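-- pv_equiv track=rewrite | github.com/wangweiqi20020221/Fraser-International-College | CMPT120/class4.py | closest_prime_number
-- ===== SOURCE A (Python) =====
-- def closest_prime_number(start):
--     """
--     Find the closest prime number to the start. If start is a prime number, then the program will return start itself.
--     :param start: The start number
--     :return: The closest prime number to the start number.
--     """
--     if start <= 2:
--         return 2
--     number = start
--     while True:
--         for i in range(2, number):
--             if number % i == 0:
--                 break
--             if i == number - 1:
--                 return number
--         number += 1
-- ===== SOURCE B (Python) =====
-- def _is_prime(n):
--     if n % 2 == 0:
--         return n == 2
--     d = 3
--     while d * d <= n: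
--         if n % d == 0:
--             return False
--         d += 2
--     return True
--
--
-- def closest_prime_number(start):
--     if start <= 2:
--         return 2
--     n = start
--     while True:
--         if _is_prime(n):
--             return n
--         n += 1
-- ===== Notes on version B (the rewrite author's own statement) =====
-- stated objective: faster
-- what changed: A tests each candidate by scanning every i in [2, n) for a divisor; B tests 2 once and then only odd trial divisors up to sqrt(n), so the per-candidate primality test drops from O(n) to O(sqrt(n)).
import Mathlib
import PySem

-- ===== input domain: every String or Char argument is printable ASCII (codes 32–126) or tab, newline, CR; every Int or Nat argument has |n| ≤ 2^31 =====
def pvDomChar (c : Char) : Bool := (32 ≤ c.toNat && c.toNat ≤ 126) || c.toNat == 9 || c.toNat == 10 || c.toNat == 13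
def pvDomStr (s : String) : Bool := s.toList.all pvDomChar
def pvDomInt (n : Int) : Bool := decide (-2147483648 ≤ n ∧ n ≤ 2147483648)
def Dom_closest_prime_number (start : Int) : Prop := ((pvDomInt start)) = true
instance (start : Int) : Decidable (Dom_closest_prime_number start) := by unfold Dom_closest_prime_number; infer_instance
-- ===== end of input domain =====

-- B replaces A's per-candidate scan of every i in [2, n) by a test of 2 and odd trial
-- divisors up to sqrt(n) (objective: faster per-candidate primality test).
-- Both while-loops are ported with an ample fuel parameter that only makes the
-- recursion total (by Bertrand's postulate a prime exists in [start, 2*start], so the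
-- fuel start.toNat + 2 is never exhausted for start ≥ 3).

-- ===== PORT A =====
-- inner 'for i in range(2, number)': false = break / fell off (no return), true = 'return number'
def pvLoopA : List Int → Int → Bool
  | [], _ => false
  | i :: rest, number =>
    if PySem.Int.mod number i == 0 then false
    else if i == number - 1 then true
    else pvLoopA rest number

-- outer 'while True: … number += 1'
def pvOuterA : Nat → Int → Int
  | 0, number => number
  | fuel+1, number =>
    if pvLoopA (PySem.List.pyRange 2 number 1) number then number
    else pvOuterA fuel (number + 1)

def closest_prime_number (start : Int) : Int :=
  if start ≤ 2 then 2
  else pvOuterA (start.toNat + 2) start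

-- ===== PORT B =====
-- 'while d * d <= n: …; d += 2' of _is_prime
def pvTrialB : Nat → Int → Int → Bool
  | 0, _, _ => true
  | fuel+1, n, d =>
    if d * d ≤ n then
      (if PySem.Int.mod n d == 0 then false else pvTrialB fuel n (d + 2))
    else true

def pvIsPrimeB (n : Int) : Bool :=
  if PySem.Int.mod n 2 == 0 then n == 2 else pvTrialB n.toNat n 3

-- 'while True: if _is_prime(n): return n; n += 1'
def pvOuterB : Nat → Int → Int
  | 0, n => n
  | fuel+1, n => if pvIsPrimeB n then n else pvOuterB fuel (n + 1)

def closest_prime_number_alt (start : Int) : Int :=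
  if start ≤ 2 then 2
  else pvOuterB (start.toNat + 2) start

-- ===== PRECONDITION & SPEC =====
def Spec_closest_prime_number (start : Int) (out : Int) : Prop := out = closest_prime_number_alt start
instance (start : Int) (out : Int) : Decidable (Spec_closest_prime_number start out) := by unfold Spec_closest_prime_number; infer_instance

-- ===== CLAIM (what is proved, stated in full; the proofs are below) =====
def Claim_equal_closest_prime_number : Prop := ∀ (start : Int), Dom_closest_prime_number start → Spec_closest_prime_number start (closest_prime_number start)

-- ===== LEMMAS AND PROOFS =====

-- A's inner loop over range(a, n) returns true iff no i in [a, n) divides n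
theorem pvLoopA_spec (n : Int) : ∀ a : Int, 2 ≤ a → a < n →
    (pvLoopA (PySem.List.pyRange a n 1) n = true ↔ ∀ i, a ≤ i → i < n → ¬ i ∣ n) := by
  have main : ∀ (k : Nat) (a : Int), (n - a).toNat = k → 2 ≤ a → a < n →
      (pvLoopA (PySem.List.pyRange a n 1) n = true ↔ ∀ i, a ≤ i → i < n → ¬ i ∣ n) := by
    intro k
    induction k with
    | zero => intro a hk _ han; omega
    | succ k ih =>
      intro a hk h2 han
      rw [PySem.List.pyRange_one_cons han]
      simp only [pvLoopA]
      have hm : PySem.Int.mod n a = n % a := PySem.Int.mod_eq_emod_of_pos (by omega)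
      by_cases hdvd : a ∣ n
      · have : PySem.Int.mod n a = 0 := by rw [hm]; exact Int.emod_eq_zero_of_dvd hdvd
        simp only [this]
        simp only [beq_self_eq_true, if_true]
        constructor
        · intro h; exact absurd h (by simp)
        · intro h; exact absurd hdvd (h a le_rfl han)
      · have hne : ¬ (PySem.Int.mod n a == 0) = true := by
          simp only [beq_iff_eq, hm]
          intro h; exact hdvd (Int.dvd_of_emod_eq_zero h)
        rw [if_neg hne]
        by_cases hlast : a = n - 1
        · have : (a == n - 1) = true := by simp [hlast]
          rw [if_pos this]
          constructor
          · intro _ i hi1 hi2 hidvd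
            have : i = a := by omega
            subst this; exact hdvd hidvd
          · intro _; rfl
        · have : ¬ (a == n - 1) = true := by simp [hlast]
          rw [if_neg this]
          have hrec := ih (a + 1) (by omega) (by omega) (by omega)
          rw [hrec]
          constructor
          · intro h i hi1 hi2 hidvd
            rcases eq_or_lt_of_le hi1 with h1 | h1
            · exact hdvd (h1 ▸ hidvd)
            · exact h i (by omega) hi2 hidvd
          · intro h i hi1 hi2 hidvd
            exact h i (by omega) hi2 hidvd
  intro a h2 han
  exact main (n - a).toNat a rfl h2 han

-- B's trial loop: true iff no e in the progression d, d+2, … with e*e ≤ n divides n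
theorem pvTrialB_spec : ∀ (fuel : Nat) (n d : Int), 0 < d →
    n < (d + 2 * (fuel : Int)) * (d + 2 * (fuel : Int)) →
    (pvTrialB fuel n d = true ↔
      ∀ e, d ≤ e → (e - d) % 2 = 0 → e * e ≤ n → ¬ e ∣ n) := by
  intro fuel
  induction fuel with
  | zero =>
    intro n d hd hlt
    simp only [pvTrialB, true_iff]
    intro e he _ hee _
    have : d * d ≤ e * e := by nlinarith
    push_cast at hlt
    nlinarith
  | succ f ih =>
    intro n d hd hlt
    simp only [pvTrialB]
    by_cases hdd : d * d ≤ n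
    · rw [if_pos hdd]
      have hm : PySem.Int.mod n d = n % d := PySem.Int.mod_eq_emod_of_pos hd
      by_cases hdvd : d ∣ n
      · have : PySem.Int.mod n d = 0 := by rw [hm]; exact Int.emod_eq_zero_of_dvd hdvd
        simp only [this, beq_self_eq_true, if_true]
        constructor
        · intro h; exact absurd h (by simp)
        · intro h; exact absurd hdvd (h d le_rfl (by simp) hdd)
      · have hne : ¬ (PySem.Int.mod n d == 0) = true := by
          simp only [beq_iff_eq, hm]
          intro h; exact hdvd (Int.dvd_of_emod_eq_zero h)
        rw [if_neg hne]
        have hrec := ih n (d + 2) (by omega) (by push_cast at hlt ⊢; linarith)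
        rw [hrec]
        constructor
        · intro h e he hpar hee hedvd
          rcases eq_or_lt_of_le he with h1 | h1
          · exact hdvd (h1 ▸ hedvd)
          · exact h e (by omega) (by omega) hee hedvd
        · intro h e he hpar hee hedvd
          exact h e (by omega) (by omega) hee hedvd
    · rw [if_neg hdd]
      simp only [true_iff]
      intro e he _ hee _
      have : d * d ≤ e * e := by nlinarith
      omega

-- arithmetic bridge between the two divisor-free characterisations
theorem bridge (n : Int) (h3 : 3 ≤ n) :
    (∀ i, 2 ≤ i → i < n → ¬ i ∣ n) ↔
    (¬ (2:Int) ∣ n ∧ ∀ e, 3 ≤ e → (e - 3) % 2 = 0 → e * e ≤ n → ¬ e ∣ n) := by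
  constructor
  · intro h
    refine ⟨h 2 le_rfl (by omega), ?_⟩
    intro e he _ hee hedvd
    have hen : e < n := by nlinarith
    exact h e (by omega) hen hedvd
  · rintro ⟨h2, hodd⟩ i hi2 hin hdvd
    have hipos : 0 < i := by omega
    -- produce a divisor e with 2 ≤ e and e * e ≤ n
    obtain ⟨e, he2, hee, hedvd⟩ : ∃ e, 2 ≤ e ∧ e * e ≤ n ∧ e ∣ n := by
      by_cases hii : i * i ≤ n
      · exact ⟨i, hi2, hii, hdvd⟩
      · refine ⟨n / i, ?_, ?_, dvd_of_mul_left_eq i (Int.mul_ediv_cancel' hdvd)⟩ <;>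
        · have heq : i * (n / i) = n := Int.mul_ediv_cancel' hdvd
          have hqpos : 0 < n / i := by nlinarith
          have hq1 : n / i ≠ 1 := by intro h1; rw [h1] at heq; omega
          have hqi : n / i < i := by nlinarith
          nlinarith
    rcases Int.emod_two_eq e with hpar | hpar
    · exact h2 (dvd_trans (Int.dvd_of_emod_eq_zero hpar) hedvd)
    · exact hodd e (by omega) (by omega) hee hedvd

theorem test_eq (n : Int) (h3 : 3 ≤ n) :
    pvLoopA (PySem.List.pyRange 2 n 1) n = pvIsPrimeB n := by
  have hL := pvLoopA_spec n 2 le_rfl (by omega)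
  have hm2 : PySem.Int.mod n 2 = n % 2 := PySem.Int.mod_eq_emod_of_pos (by omega)
  unfold pvIsPrimeB
  by_cases h2 : (2:Int) ∣ n
  · have : (PySem.Int.mod n 2 == 0) = true := by
      simp only [beq_iff_eq, hm2]; exact Int.emod_eq_zero_of_dvd h2
    rw [if_pos this]
    have hA : pvLoopA (PySem.List.pyRange 2 n 1) n = false := by
      rcases Bool.eq_false_or_eq_true (pvLoopA (PySem.List.pyRange 2 n 1) n) with h | h
      · exact absurd h2 (hL.mp h 2 le_rfl (by omega))
      · exact h
    rw [hA]
    have : (n == 2) = false := by simp; omega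
    rw [this]
  · have : ¬ (PySem.Int.mod n 2 == 0) = true := by
      simp only [beq_iff_eq, hm2]
      intro h; exact h2 (Int.dvd_of_emod_eq_zero h)
    rw [if_neg this]
    have hT := pvTrialB_spec n.toNat n 3 (by omega)
      (by
        have : (n.toNat : Int) = n := Int.toNat_of_nonneg (by omega)
        rw [this]; nlinarith)
    rw [Bool.eq_iff_iff, hL, hT, bridge n h3]
    constructor
    · rintro ⟨_, h⟩; exact h
    · intro h; exact ⟨h2, h⟩

theorem outer_eq : ∀ (fuel : Nat) (n : Int), 3 ≤ n → pvOuterA fuel n = pvOuterB fuel n := by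
  intro fuel
  induction fuel with
  | zero => intro n _; rfl
  | succ f ih =>
    intro n h3
    simp only [pvOuterA, pvOuterB, test_eq n h3]
    split
    · rfl
    · exact ih (n + 1) (by omega)

-- ===== VERDICT (by name: the statement is the Claim_ definition above) =====
theorem closest_prime_number_spec : Claim_equal_closest_prime_number := by
  intro start _
  unfold Spec_closest_prime_number closest_prime_number closest_prime_number_alt
  split
  · rfl
  · exact outer_eq _ start (by omega)
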